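-- pv_equiv track=rewrite | github.com/borapocan/Kattis-Solutions | aprizenoonecanwin.py | mark_for_sale
-- ===== SOURCE A (Python) =====
-- def mark_for_sale(min_cost, items):
--     items = sorted(items)
--     no_items = len(items)
--     i = 1
--
--     for i in range(1, no_items):
--         if items[i] + items[i - 1] > min_cost:
--             return i
--     return no_items
-- ===== SOURCE B (Python) =====
-- def mark_for_sale(min_cost, items):
--     # Binary search: after sorting, adjacent-pair sums are non-decreasing, so the
--     # first index whose pair sum exceeds min_cost can be found by bisection.
--     xs = sorted(items)
--     n = len(xs)
--     lo, hi = 1, n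
--     while lo < hi:
--         mid = (lo + hi) // 2
--         if xs[mid] + xs[mid - 1] > min_cost:
--             hi = mid
--         else:
--             lo = mid + 1
--     return lo if lo < n else n
-- ===== Notes on version B (the rewrite author's own statement) =====
-- stated objective: alternative
-- what changed: Replaces the linear scan over adjacent pairs with a binary search for the first index whose pair sum exceeds min_cost, valid because the pair sums of a sorted list are non-decreasing; total cost stays dominated by the sort.
import Mathlib
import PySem

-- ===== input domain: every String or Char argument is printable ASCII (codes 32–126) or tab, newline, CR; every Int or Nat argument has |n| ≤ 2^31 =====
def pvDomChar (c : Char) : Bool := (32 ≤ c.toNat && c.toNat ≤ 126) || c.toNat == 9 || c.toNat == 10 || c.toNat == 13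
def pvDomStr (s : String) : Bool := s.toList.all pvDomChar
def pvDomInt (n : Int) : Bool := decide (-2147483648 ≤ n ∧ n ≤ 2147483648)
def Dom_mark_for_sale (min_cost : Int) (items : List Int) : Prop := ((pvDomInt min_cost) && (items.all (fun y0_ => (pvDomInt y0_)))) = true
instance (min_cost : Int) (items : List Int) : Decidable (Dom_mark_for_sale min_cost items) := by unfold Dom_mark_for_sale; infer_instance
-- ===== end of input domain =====

-- ===== PORT A =====
-- B changes the linear scan to a binary search over the (non-decreasing) adjacent pair sums (the sort still dominates total cost).
-- loop 'for i in range(1, no_items): if items[i]+items[i-1] > min_cost: return i' — every index used is in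
-- range (1 ≤ i < n) so plain List.getD is exact for Python indexing; the structural fuel (= n, enough for
-- every iteration) only makes the while-shaped recursion structural and never alters a step.
def pvScanA (min_cost : Int) (xs : List Int) (n : Nat) : Nat → Nat → Int
  | 0, _ => (n : Int)
  | k + 1, i =>
    if i < n then
      if xs.getD i 0 + xs.getD (i - 1) 0 > min_cost then (i : Int)
      else pvScanA min_cost xs n k (i + 1)
    else (n : Int)

def mark_for_sale (min_cost : Int) (items : List Int) : Int :=
  let xs := PySem.List.sorted items (fun x => x) false
  pvScanA min_cost xs xs.length xs.length 1

-- ===== PORT B =====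
-- the while-loop of Source B; lo, hi are always nonnegative Python ints with lo ≤ hi ≤ n, so Nat with Nat
-- division is exact for '(lo + hi) // 2' and every index used (1 ≤ mid < n) is in range for getD; the
-- fuel (= n ≥ hi - lo, and the interval shrinks each step) only makes the loop structural.
def pvBisect (min_cost : Int) (xs : List Int) : Nat → Nat → Nat → Nat
  | 0, lo, _ => lo
  | f + 1, lo, hi =>
    if lo < hi then
      let mid := (lo + hi) / 2
      if xs.getD mid 0 + xs.getD (mid - 1) 0 > min_cost then pvBisect min_cost xs f lo mid
      else pvBisect min_cost xs f (mid + 1) hi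
    else lo

def mark_for_sale_alt (min_cost : Int) (items : List Int) : Int :=
  let xs := PySem.List.sorted items (fun x => x) false
  let n := xs.length
  let lo := pvBisect min_cost xs n 1 n
  if lo < n then (lo : Int) else (n : Int)

-- ===== PRECONDITION & SPEC =====
def Spec_mark_for_sale (min_cost : Int) (items : List Int) (out : Int) : Prop := out = mark_for_sale_alt min_cost items
instance (min_cost : Int) (items : List Int) (out : Int) : Decidable (Spec_mark_for_sale min_cost items out) := by unfold Spec_mark_for_sale; infer_instance

-- ===== CLAIM (what is proved, stated in full; the proofs are below) =====
def Claim_equal_mark_for_sale : Prop := ∀ (min_cost : Int) (items : List Int), Dom_mark_for_sale min_cost items → Spec_mark_for_sale min_cost items (mark_for_sale min_cost items)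

-- ===== LEMMAS AND PROOFS =====

-- "r is the answer": the first index in [1, n) whose pair sum exceeds min_cost, or n if none.
def pvGood (min_cost : Int) (xs : List Int) (n r : Nat) : Prop :=
  1 ≤ r ∧ r ≤ n ∧ (∀ j, 1 ≤ j → j < r → ¬ (xs.getD j 0 + xs.getD (j - 1) 0 > min_cost)) ∧
    (r < n → xs.getD r 0 + xs.getD (r - 1) 0 > min_cost)

theorem pvGood_unique (min_cost : Int) (xs : List Int) (n r1 r2 : Nat)
    (h1 : pvGood min_cost xs n r1) (h2 : pvGood min_cost xs n r2) : r1 = r2 := by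
  obtain ⟨a1, b1, c1, d1⟩ := h1
  obtain ⟨a2, b2, c2, d2⟩ := h2
  by_contra hne
  rcases Nat.lt_or_ge r1 r2 with h | h
  · exact c2 r1 a1 h (d1 (lt_of_lt_of_le h b2))
  · have h' : r2 < r1 := lt_of_le_of_ne h (fun e => hne e.symm)
    exact c1 r2 a2 h' (d2 (lt_of_lt_of_le h' b1))

theorem pvScanA_good (min_cost : Int) (xs : List Int) (n : Nat) :
    ∀ k i, n - i ≤ k → 1 ≤ i → i ≤ n →
    (∀ j, 1 ≤ j → j < i → ¬ (xs.getD j 0 + xs.getD (j - 1) 0 > min_cost)) →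
    ∃ r : Nat, pvScanA min_cost xs n k i = (r : Int) ∧ pvGood min_cost xs n r := by
  intro k
  induction k with
  | zero =>
    intro i hk h1 h2 hpre
    have hin : i = n := by omega
    exact ⟨n, rfl, h1.trans_eq hin, le_refl n,
      fun j hj hjn => hpre j hj (hjn.trans_eq hin.symm),
      fun h => absurd h (lt_irrefl n)⟩
  | succ k ih =>
    intro i hk h1 h2 hpre
    simp only [pvScanA]
    by_cases hin : i < n
    · simp only [hin, if_pos]
      by_cases hp : xs.getD i 0 + xs.getD (i - 1) 0 > min_cost
      · exact ⟨i, if_pos hp, h1, le_of_lt hin, hpre, fun _ => hp⟩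
      · simp only [hp, if_neg, not_false_iff]
        refine ih (i + 1) (by omega) (by omega) (by omega) ?_
        intro j hj hji
        by_cases hji' : j < i
        · exact hpre j hj hji'
        · have : j = i := by omega
          rw [this]; exact hp
    · simp only [hin, if_neg, not_false_iff]
      have hin' : i = n := by omega
      exact ⟨n, rfl, h1.trans_eq hin', le_refl n,
        fun j hj hjn => hpre j hj (hjn.trans_eq hin'.symm),
        fun h => absurd h (lt_irrefl n)⟩

theorem pvBisect_good (min_cost : Int) (xs : List Int) (n : Nat)
    (mono : ∀ j k, 1 ≤ j → j ≤ k → k < n →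
      xs.getD j 0 + xs.getD (j - 1) 0 > min_cost → xs.getD k 0 + xs.getD (k - 1) 0 > min_cost) :
    ∀ f lo hi, hi - lo ≤ f → 1 ≤ lo → lo ≤ hi → hi ≤ n →
    (∀ j, 1 ≤ j → j < lo → ¬ (xs.getD j 0 + xs.getD (j - 1) 0 > min_cost)) →
    (hi < n → xs.getD hi 0 + xs.getD (hi - 1) 0 > min_cost) →
    pvGood min_cost xs n (pvBisect min_cost xs f lo hi) := by
  intro f
  induction f with
  | zero =>
    intro lo hi hf h1 hlh hhn hlow hhi
    have he : lo = hi := by omega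
    exact ⟨h1, he ▸ hhn, hlow, he ▸ hhi⟩
  | succ f ih =>
    intro lo hi hf h1 hlh hhn hlow hhi
    simp only [pvBisect]
    by_cases hlt : lo < hi
    · simp only [hlt, if_pos]
      set mid := (lo + hi) / 2 with hmid
      have hmlo : lo ≤ mid := by omega
      have hmhi : mid < hi := by omega
      by_cases hp : xs.getD mid 0 + xs.getD (mid - 1) 0 > min_cost
      · simp only [hp, if_pos]
        exact ih lo mid (by omega) h1 hmlo (by omega) hlow (fun _ => hp)
      · simp only [hp, if_neg, not_false_iff]
        refine ih (mid + 1) hi (by omega) (by omega) (by omega) hhn ?_ hhi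
        intro j hj hjm
        by_cases hjl : j < lo
        · exact hlow j hj hjl
        · intro hpj
          exact hp (mono j mid hj (by omega) (by omega) hpj)
    · simp only [hlt, if_neg, not_false_iff]
      have he : lo = hi := by omega
      exact ⟨h1, he ▸ hhn, hlow, he ▸ hhi⟩

theorem pv_mono (min_cost : Int) (items : List Int) :
    ∀ j k, 1 ≤ j → j ≤ k → k < (PySem.List.sorted items (fun x => x) false).length →
      (PySem.List.sorted items (fun x => x) false).getD j 0 +
        (PySem.List.sorted items (fun x => x) false).getD (j - 1) 0 > min_cost →
      (PySem.List.sorted items (fun x => x) false).getD k 0 +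
        (PySem.List.sorted items (fun x => x) false).getD (k - 1) 0 > min_cost := by
  intro j k h1 hjk hk hp
  set xs := PySem.List.sorted items (fun x => x) false with hxs
  have hjlen : j < xs.length := by omega
  have hj1 : j - 1 < xs.length := by omega
  have hk1 : k - 1 < xs.length := by omega
  rw [List.getD_eq_getElem xs 0 hjlen, List.getD_eq_getElem xs 0 hj1] at hp
  rw [List.getD_eq_getElem xs 0 hk, List.getD_eq_getElem xs 0 hk1]
  have m1 : xs[j] ≤ xs[k] := PySem.List.sorted_id_getElem_mono items hjk hk
  have m2 : xs[j - 1] ≤ xs[k - 1] := PySem.List.sorted_id_getElem_mono items (by omega) hk1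
  omega

theorem pv_main (min_cost : Int) (xs : List Int)
    (mono : ∀ j k, 1 ≤ j → j ≤ k → k < xs.length →
      xs.getD j 0 + xs.getD (j - 1) 0 > min_cost →
      xs.getD k 0 + xs.getD (k - 1) 0 > min_cost) :
    pvScanA min_cost xs xs.length xs.length 1 =
      if pvBisect min_cost xs xs.length 1 xs.length < xs.length
      then ((pvBisect min_cost xs xs.length 1 xs.length : Nat) : Int) else (xs.length : Int) := by
  by_cases hn0 : xs.length = 0
  · simp [pvScanA, pvBisect, hn0]
  · obtain ⟨rA, hA, hgA⟩ := pvScanA_good min_cost xs xs.length xs.length 1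
      (by omega) (le_refl 1) (by omega) (by intro j hj hj1; omega)
    have hgB := pvBisect_good min_cost xs xs.length mono xs.length 1 xs.length
      (by omega) (le_refl 1) (by omega) (le_refl _)
      (by intro j hj hj1; omega) (fun h => absurd h (lt_irrefl _))
    have heq : rA = pvBisect min_cost xs xs.length 1 xs.length :=
      pvGood_unique _ _ _ _ _ hgA hgB
    rw [hA, heq]
    rcases Nat.lt_or_ge (pvBisect min_cost xs xs.length 1 xs.length) xs.length with h | h
    · rw [if_pos h]
    · rw [if_neg (not_lt.mpr h), le_antisymm hgB.2.1 h]

-- ===== VERDICT (by name: the statement is the Claim_ definition above) =====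
theorem mark_for_sale_spec : Claim_equal_mark_for_sale := by
  intro min_cost items _
  exact pv_main min_cost (PySem.List.sorted items (fun x => x) false) (pv_mono min_cost items)
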